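-- pv_equiv track=rewrite | github.com/syeonHong/CUK_NL_team3 | src/create_pairs.py | generate_bio_tags
-- ===== SOURCE A (Python) =====
-- def generate_bio_tags(tokens: list, spans: dict):
--     tags = {"bio_s": ["O"] * len(tokens), "bio_v": ["O"] * len(tokens),
--             "bio_o": ["O"] * len(tokens), "bio_adv": ["O"] * len(tokens)}
--
--     def fill_tags(tag_type, span_key):
--         span = spans.get(span_key)
--         if span:
--             start, end = span
--             if start < 0 or start >= len(tokens): return
--             tags[tag_type][start] = f"B-{span_key.upper()}"
--             for i in range(start + 1, end + 1):
--                 if i < len(tokens):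
--                     tags[tag_type][i] = f"I-{span_key.upper()}"
--
--     fill_tags("bio_s", "subject")
--     fill_tags("bio_v", "verb")
--     fill_tags("bio_o", "object")
--     fill_tags("bio_adv", "adv")
--     return tags
-- ===== SOURCE B (Python) =====
-- def generate_bio_tags(tokens: list, spans: dict):
--     n = len(tokens)
--
--     def row(key):
--         span = spans.get(key)
--         if not span:
--             return ["O"] * n
--         start, end = span
--         if not (0 <= start < n):
--             return ["O"] * n
--         u = key.upper()
--         inside = max(0, min(end, n - 1) - start)
--         return (["O"] * start + ["B-" + u] + ["I-" + u] * inside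
--                 + ["O"] * (n - 1 - start - inside))
--
--     return {"bio_s": row("subject"), "bio_v": row("verb"),
--             "bio_o": row("object"), "bio_adv": row("adv")}
-- ===== Notes on version B (the rewrite author's own statement) =====
-- stated objective: alternative
-- what changed: Each tag row is assembled as a closed-form concatenation of replicated segments (O-prefix, single B cell, arithmetically clipped I-run, O-suffix) computed from the span bounds, instead of allocating an all-O list and mutating cells over the span's index range.
import Mathlib
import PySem

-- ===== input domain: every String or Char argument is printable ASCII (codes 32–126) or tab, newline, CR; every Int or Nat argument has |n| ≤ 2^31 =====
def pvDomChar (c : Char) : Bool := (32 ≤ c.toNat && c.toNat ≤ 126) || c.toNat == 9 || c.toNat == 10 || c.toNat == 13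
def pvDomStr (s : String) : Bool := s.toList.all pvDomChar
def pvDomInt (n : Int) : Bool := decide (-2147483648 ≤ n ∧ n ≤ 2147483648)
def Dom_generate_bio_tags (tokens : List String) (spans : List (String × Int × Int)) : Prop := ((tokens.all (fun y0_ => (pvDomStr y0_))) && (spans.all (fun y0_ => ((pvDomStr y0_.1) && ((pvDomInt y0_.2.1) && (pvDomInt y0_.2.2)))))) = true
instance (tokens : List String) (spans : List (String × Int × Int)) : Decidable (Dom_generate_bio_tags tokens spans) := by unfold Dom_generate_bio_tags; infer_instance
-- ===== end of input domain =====

-- B assembles each tag row as a closed-form concatenation of replicated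
-- segments (O-prefix, one B cell, arithmetically clipped I-run, O-suffix)
-- computed from the span bounds, instead of mutating an "O"-filled list over
-- the span's index range as A does.

-- ===== PORT A =====
-- A's inner fill_tags, acting on one tag row at a time (each dict row of A is
-- mutated independently; the port threads the row explicitly).
def pvFillA (tokens : List String) (spans : List (String × Int × Int)) (span_key : String) : List String :=
  let tag := List.replicate tokens.length "O"
  match (PySem.Dict.mk spans).get? span_key with
  | none => tag                                     -- spans.get returned None: `if span:` fails
  | some (start, end_) =>
    if start < 0 ∨ (tokens.length : Int) ≤ start then tag
    else
      let tag := tag.set start.toNat ("B-" ++ PySem.Str.upper span_key)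
      (PySem.List.pyRange (start + 1) (end_ + 1) 1).foldl
        (fun t i =>
          if i < (tokens.length : Int) then t.set i.toNat ("I-" ++ PySem.Str.upper span_key)
          else t) tag

def generate_bio_tags (tokens : List String) (spans : List (String × Int × Int)) : List (String × List String) :=
  [("bio_s", pvFillA tokens spans "subject"),
   ("bio_v", pvFillA tokens spans "verb"),
   ("bio_o", pvFillA tokens spans "object"),
   ("bio_adv", pvFillA tokens spans "adv")]

-- ===== PORT B =====
-- B's row: four replicated segments concatenated, lengths computed arithmetically.
def pvRowB (tokens : List String) (spans : List (String × Int × Int)) (key : String) : List String :=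
  let n : Int := tokens.length
  match (PySem.Dict.mk spans).get? key with
  | none => List.replicate tokens.length "O"
  | some (start, end_) =>
    if 0 ≤ start ∧ start < n then
      let u := PySem.Str.upper key
      let inside : Int := max 0 (min end_ (n - 1) - start)
      List.replicate start.toNat "O" ++ ["B-" ++ u] ++
        List.replicate inside.toNat ("I-" ++ u) ++
        List.replicate (n - 1 - start - inside).toNat "O"
    else List.replicate tokens.length "O"

def generate_bio_tags_alt (tokens : List String) (spans : List (String × Int × Int)) : List (String × List String) :=
  [("bio_s", pvRowB tokens spans "subject"),
   ("bio_v", pvRowB tokens spans "verb"),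
   ("bio_o", pvRowB tokens spans "object"),
   ("bio_adv", pvRowB tokens spans "adv")]

-- ===== PRECONDITION & SPEC =====
def Spec_generate_bio_tags (tokens : List String) (spans : List (String × Int × Int)) (out : List (String × List String)) : Prop := out = generate_bio_tags_alt tokens spans
instance (tokens : List String) (spans : List (String × Int × Int)) (out : List (String × List String)) : Decidable (Spec_generate_bio_tags tokens spans out) := by unfold Spec_generate_bio_tags; infer_instance

-- ===== CLAIM =====
def Claim_equal_generate_bio_tags : Prop := ∀ (tokens : List String) (spans : List (String × Int × Int)), Dom_generate_bio_tags tokens spans → Spec_generate_bio_tags tokens spans (generate_bio_tags tokens spans)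

-- ===== LEMMAS AND PROOFS =====

lemma pvLoopGet (N : Nat) (v : String) (L : List Int) (hL : ∀ i ∈ L, 0 ≤ i) :
    ∀ (t0 : List String), t0.length = N → ∀ (j : Nat),
    (L.foldl (fun t i => if i < (N : Int) then t.set i.toNat v else t) t0)[j]? =
      if (j : Int) ∈ L ∧ j < N then some v else t0[j]? := by
  induction L with
  | nil => intro t0 hlen j; simp
  | cons i L ih =>
    intro t0 hlen j
    have hi : 0 ≤ i := hL i (by simp)
    have hlen' : (if i < (N : Int) then t0.set i.toNat v else t0).length = N := by
      split <;> simp [hlen]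
    rw [List.foldl_cons, ih (fun x hx => hL x (by simp [hx])) _ hlen' j]
    simp only [List.mem_cons]
    by_cases hjN : j < N
    · by_cases hmem : (j : Int) ∈ L
      · simp [hmem, hjN]
      · by_cases hji : (j : Int) = i
        · have hiN : i < (N : Int) := by omega
          rw [if_neg (show ¬((j : Int) ∈ L ∧ j < N) by simp [hmem]), if_pos hiN,
              if_pos (show ((j : Int) = i ∨ (j : Int) ∈ L) ∧ j < N from ⟨Or.inl hji, hjN⟩),
              List.getElem?_set, if_pos (show i.toNat = j by omega),
              if_pos (show i.toNat < t0.length by omega)]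
        · rw [if_neg (show ¬((j : Int) ∈ L ∧ j < N) by simp [hmem]),
              if_neg (show ¬(((j : Int) = i ∨ (j : Int) ∈ L) ∧ j < N) by simp [hji, hmem])]
          split
          · rename_i hiN
            rw [List.getElem?_set, if_neg (show ¬ i.toNat = j by omega)]
          · rfl
    · rw [if_neg (show ¬((j : Int) ∈ L ∧ j < N) from fun h => hjN h.2),
          if_neg (show ¬(((j : Int) = i ∨ (j : Int) ∈ L) ∧ j < N) from fun h => hjN h.2)]
      split
      · rename_i hiN
        rw [List.getElem?_set]
        split
        · rename_i he
          rw [if_neg (show ¬ i.toNat < t0.length by omega),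
              List.getElem?_eq_none (show t0.length ≤ j by omega)]
        · rfl
      · rfl

-- getElem? of B's four-segment concatenation, by segment arithmetic.
lemma pvConcatGet (s m r : Nat) (b i : String) (j : Nat) :
    (List.replicate s "O" ++ [b] ++ List.replicate m i ++ List.replicate r "O")[j]? =
      if j < s then some "O"
      else if j = s then some b
      else if j < s + 1 + m then some i
      else if j < s + 1 + m + r then some "O"
      else none := by
  simp only [List.getElem?_append, List.length_append, List.length_replicate,
    List.length_cons, List.length_nil, List.getElem?_replicate, List.getElem?_cons,
    List.getElem?_nil]
  split_ifs <;> first | rfl | omega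

lemma pvFill_eq_row (tokens : List String) (spans : List (String × Int × Int)) (k : String) :
    pvFillA tokens spans k = pvRowB tokens spans k := by
  unfold pvFillA pvRowB
  cases h : (PySem.Dict.mk spans).get? k with
  | none => rfl
  | some p =>
    obtain ⟨start, end_⟩ := p
    simp only
    by_cases hg : start < 0 ∨ (tokens.length : Int) ≤ start
    · rw [if_pos hg, if_neg (by omega)]
    · rw [if_neg hg, if_pos (by omega)]
      have hs0 : 0 ≤ start := by omega
      have hsn : start < (tokens.length : Int) := by omega
      apply List.ext_getElem?
      intro j
      rw [pvLoopGet tokens.length _ _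
            (fun i hi => by
              have := (PySem.List.mem_pyRange_one).mp hi
              omega)
            _ (by simp) j]
      rw [pvConcatGet]
      simp only [PySem.List.mem_pyRange_one, List.getElem?_set,
        List.getElem?_replicate, List.length_replicate]
      split_ifs <;> first | rfl | omega

-- ===== VERDICT =====
theorem generate_bio_tags_spec : Claim_equal_generate_bio_tags := by
  intro tokens spans _
  unfold Spec_generate_bio_tags generate_bio_tags generate_bio_tags_alt
  rw [pvFill_eq_row, pvFill_eq_row, pvFill_eq_row, pvFill_eq_row]
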